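-- pv_equiv track=rewrite | github.com/johnwasham/python-solutions | solutions/strings/a_to_1.py | solution
-- ===== SOURCE A (Python) =====
-- def solution(s):
--     result = []
--
--     for token in s.split('-'):
--         num = ""
--         for c in token:
--             if c.isalpha():
--                 if num:
--                     corres = int(num) - 1 + 97
--                     result.append(chr(corres))
--                     num = ""
--                 corres = ord(c) - 97 + 1
--                 result.append(str(corres))
--             else:
--                 num += c
--
--         if num:
--             corres = int(num) - 1 + 97
--             result.append(chr(corres))
--
--     return '-'.join(result)
-- ===== SOURCE B (Python) =====
-- def solution(s):
--     out = []
--     for token in s.split('-'):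
--         i, n = 0, len(token)
--         while i < n:
--             if token[i].isalpha():
--                 out.append(str(ord(token[i]) - 96))
--                 i += 1
--             else:
--                 j = i
--                 while j < n and not token[j].isalpha():
--                     j += 1
--                 out.append(chr(int(token[i:j]) + 96))
--                 i = j
--     return '-'.join(out)
-- ===== Notes on version B (the rewrite author's own statement) =====
-- stated objective: alternative
-- what changed: Replaces A's per-character `num` accumulator with end-of-token flush by an index/two-pointer scan that slices out each maximal non-letter run at once and converts it in one step.
import Mathlib
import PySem

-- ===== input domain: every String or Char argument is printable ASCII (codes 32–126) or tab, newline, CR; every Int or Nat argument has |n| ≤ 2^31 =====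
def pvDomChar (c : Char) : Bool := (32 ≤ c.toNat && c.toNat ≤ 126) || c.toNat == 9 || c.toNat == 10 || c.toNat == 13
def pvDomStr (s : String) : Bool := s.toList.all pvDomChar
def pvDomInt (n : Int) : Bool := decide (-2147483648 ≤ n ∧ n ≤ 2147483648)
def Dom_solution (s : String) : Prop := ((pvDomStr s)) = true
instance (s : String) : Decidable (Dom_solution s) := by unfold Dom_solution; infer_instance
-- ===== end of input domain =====

-- B replaces A's character-by-character `num` accumulator with an index/two-pointer scan that
-- slices out each maximal non-letter run at once (objective: alternative decomposition).

-- chr(n): exact for valid scalar values; Pre_ keeps every flushed code valid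
def pyChr (n : Int) : Char := Char.ofNat n.toNat
-- int(num): PySem.Int.ofChars? is exact; none = ValueError, excluded by Pre_
def pyInt (cs : List Char) : Int := (PySem.Int.ofChars? cs).getD 0

-- ===== PORT A =====
def solStepA (st : List (List Char) × List Char) (c : Char) : List (List Char) × List Char :=
  let result := st.1
  let num := st.2
  if PySem.Chars.isalpha c then
    let result := if num ≠ [] then result ++ [[pyChr (pyInt num - 1 + 97)]] else result
    (result ++ [PySem.Int.toChars ((c.toNat : Int) - 97 + 1)], [])
  else
    (result, num ++ [c])

def solTokenA (result : List (List Char)) (token : List Char) : List (List Char) :=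
  let st := token.foldl solStepA (result, [])
  if st.2 ≠ [] then st.1 ++ [[pyChr (pyInt st.2 - 1 + 97)]] else st.1

def solution (s : String) : String :=
  let result := (PySem.Chars.splitOn s.toList ['-']).foldl solTokenA []
  String.mk (PySem.Chars.join ['-'] result)

-- ===== PORT B =====
def altTok : List Char → List (List Char)
  | [] => []
  | c :: rest =>
    if PySem.Chars.isalpha c then
      PySem.Int.toChars ((c.toNat : Int) - 96) :: altTok rest
    else
      [pyChr (pyInt ((c :: rest).takeWhile (fun x => !PySem.Chars.isalpha x)) + 96)]
        :: altTok ((c :: rest).dropWhile (fun x => !PySem.Chars.isalpha x))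
termination_by cs => cs.length
decreasing_by
  · simp
  · simp only [List.dropWhile_cons, *]
    simp only [Bool.not_eq_eq_eq_not, Bool.not_true] at *
    simp [*, Nat.lt_succ_iff, List.length_dropWhile_le]

def solution_alt (s : String) : String :=
  let out := (PySem.Chars.splitOn s.toList ['-']).foldl (fun out t => out ++ altTok t) []
  String.mk (PySem.Chars.join ['-'] out)

-- ===== PRECONDITION & SPEC =====
-- the maximal runs of non-letter characters of a token (the strings A feeds to int())
def runsNA (t : List Char) : List (List Char) :=
  (t.splitBy (fun a b => PySem.Chars.isalpha a == PySem.Chars.isalpha b)).filter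
    (fun g => !(g.head?.elim false PySem.Chars.isalpha))

def okRun (run : List Char) : Bool :=
  match PySem.Int.ofChars? run with
  | some v => decide (v + 96 < 1114112 ∧ (v + 96 < 55296 ∨ 57344 ≤ v + 96))
  | none => false

-- Pre_ excludes exactly the inputs where Python A raises: a non-letter run that int() rejects
-- (ValueError), or whose chr() code is a surrogate / out of range (not representable as a Char).
def Pre_solution (s : String) : Prop :=
  ∀ t ∈ PySem.Chars.splitOn s.toList ['-'], ∀ r ∈ runsNA t, okRun r = true
instance (s : String) : Decidable (Pre_solution s) := by unfold Pre_solution; infer_instance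

def pvWitness_solution : String := "abc-3-12x"

def Spec_solution (s : String) (out : String) : Prop := out = solution_alt s
instance (s : String) (out : String) : Decidable (Spec_solution s out) := by unfold Spec_solution; infer_instance

-- ===== CLAIM (what is proved, stated in full; the proofs are below) =====
def Claim_equal_solution : Prop := ∀ (s : String), Dom_solution s → Pre_solution s → Spec_solution s (solution s)

-- ===== LEMMAS AND PROOFS =====

theorem chr_shift (a : Int) : pyChr (a - 1 + 97) = pyChr (a + 96) := by
  have : a - 1 + 97 = a + 96 := by ring
  rw [this]

theorem ord_shift (a : Int) : a - 97 + 1 = a - 96 := by ring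

-- A's per-token contribution, written as a standalone recursion
def grp (num : List Char) : List Char → List (List Char)
  | [] => if num ≠ [] then [[pyChr (pyInt num - 1 + 97)]] else []
  | c :: cs =>
    if PySem.Chars.isalpha c then
      (if num ≠ [] then [[pyChr (pyInt num - 1 + 97)]] else [])
        ++ [PySem.Int.toChars ((c.toNat : Int) - 97 + 1)] ++ grp [] cs
    else grp (num ++ [c]) cs

theorem foldA_grp (cs : List Char) : ∀ (result : List (List Char)) (num : List Char),
    (let st := cs.foldl solStepA (result, num);
     if st.2 ≠ [] then st.1 ++ [[pyChr (pyInt st.2 - 1 + 97)]] else st.1)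
    = result ++ grp num cs := by
  induction cs with
  | nil => intro result num; by_cases h : num = [] <;> simp [grp, h]
  | cons c cs ih =>
    intro result num
    by_cases h : PySem.Chars.isalpha c
    · by_cases hn : num = [] <;>
        simp [List.foldl_cons, solStepA, grp, h, hn, ih, List.append_assoc]
    · simp [List.foldl_cons, solStepA, grp, h, ih]

-- B's per-token contribution with a pending run prefix
def altP (num cs : List Char) : List (List Char) :=
  if num = [] then altTok cs
  else [pyChr (pyInt (num ++ cs.takeWhile (fun x => !PySem.Chars.isalpha x)) + 96)]
        :: altTok (cs.dropWhile (fun x => !PySem.Chars.isalpha x))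

theorem grp_altP (cs : List Char) : ∀ num, grp num cs = altP num cs := by
  induction cs with
  | nil =>
    intro num
    by_cases h : num = [] <;> simp [grp, altP, altTok, h, chr_shift]
  | cons c cs ih =>
    intro num
    by_cases h : PySem.Chars.isalpha c
    · by_cases hn : num = [] <;>
        simp [grp, altP, altTok, h, hn, ih, chr_shift, ord_shift, List.takeWhile_cons, List.dropWhile_cons]
    · have h' : PySem.Chars.isalpha c = false := by simpa using h
      have ihc := ih (num ++ [c])
      simp only [altP] at ihc
      rw [if_neg (by simp)] at ihc
      by_cases hn : num = []
      · subst hn; simpa [grp, altP, altTok, h', List.takeWhile_cons, List.dropWhile_cons] using ihc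
      · simp [grp, altP, altTok, h', hn, ihc, List.takeWhile_cons, List.dropWhile_cons,
          List.append_assoc]

theorem tokA_alt (result : List (List Char)) (t : List Char) :
    solTokenA result t = result ++ altTok t := by
  have := foldA_grp t result []
  simp only [solTokenA, this, grp_altP, altP]
  simp

theorem foldl_tok (ts : List (List Char)) : ∀ (r : List (List Char)),
    ts.foldl solTokenA r = ts.foldl (fun out t => out ++ altTok t) r := by
  induction ts with
  | nil => intro r; rfl
  | cons t ts ih => intro r; simp [List.foldl_cons, tokA_alt, ih]

-- ===== VERDICT (by name: the statement is the Claim_ definition above) =====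
theorem solution_spec : Claim_equal_solution := by
  intro s _ _
  unfold Spec_solution solution solution_alt
  rw [foldl_tok]
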